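-- pv_equiv track=rewrite | github.com/imironhead/ml_kaggle | qdraw/qdraw/dataset_preprocess.py | center_strokes
-- ===== SOURCE A (Python) =====
-- def center_strokes(strokes):
--     """
--     """
--     def extremum(ls, idx, fun):
--         """
--         """
--         for i, points in enumerate(ls):
--             m = fun(points[idx])
--
--             n = m if i == 0 else fun(n, m)
--
--         return n
--
--     min_x, min_y = extremum(strokes, 0, min), extremum(strokes, 1, min)
--     max_x, max_y = extremum(strokes, 0, max), extremum(strokes, 1, max)
--
--     dx = (256 - (max_x - min_x)) // 2 - min_x
--     dy = (256 - (max_y - min_y)) // 2 - min_y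
--
--     output_strokes = []
--
--     for xs, ys in strokes:
--         xs = [x + dx for x in xs]
--         ys = [y + dy for y in ys]
--
--         output_strokes.append((xs, ys))
--
--     return output_strokes
-- ===== SOURCE B (Python) =====
-- def center_strokes(strokes):
--     # B: sort the flattened coordinate lists once and read the bounding box off
--     # the endpoints, instead of A's four scans with a generic extremum helper.
--     allx = sorted(x for xs, _ in strokes for x in xs)
--     ally = sorted(y for _, ys in strokes for y in ys)
--     dx = (256 - (allx[-1] - allx[0])) // 2 - allx[0]
--     dy = (256 - (ally[-1] - ally[0])) // 2 - ally[0]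
--     return [([x + dx for x in xs], [y + dy for y in ys]) for xs, ys in strokes]
-- ===== Notes on version B (the rewrite author's own statement) =====
-- stated objective: alternative
-- what changed: Replaces A's generic extremum helper run four times over the strokes with flatten-and-sort: both coordinate axes are flattened into one list each, sorted once, and the bounding box is read off the sorted endpoints; the shift and output construction are unchanged.
import Mathlib
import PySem

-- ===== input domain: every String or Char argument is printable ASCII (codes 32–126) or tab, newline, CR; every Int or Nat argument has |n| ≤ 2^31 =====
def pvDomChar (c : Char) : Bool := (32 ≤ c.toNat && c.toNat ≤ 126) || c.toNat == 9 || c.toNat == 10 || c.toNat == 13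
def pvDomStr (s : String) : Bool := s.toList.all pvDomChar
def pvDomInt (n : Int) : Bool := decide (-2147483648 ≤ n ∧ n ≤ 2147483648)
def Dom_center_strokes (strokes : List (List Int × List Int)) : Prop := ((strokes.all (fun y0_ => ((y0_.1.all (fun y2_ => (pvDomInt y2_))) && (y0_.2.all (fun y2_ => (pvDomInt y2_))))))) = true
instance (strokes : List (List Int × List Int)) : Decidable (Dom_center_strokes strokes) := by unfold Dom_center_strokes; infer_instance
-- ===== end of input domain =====

-- B computes the bounding box by sorting each flattened coordinate axis once and reading
-- the endpoints, instead of A's four scans with a generic extremum helper; same output.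

-- ===== PORT A =====
-- A's inner helper `extremum(ls, idx, fun)`: loop with `n` bound on the first iteration.
-- none = the Python raises (NameError on empty ls, ValueError from min/max on an empty points list).
def extremumGo (idx : Nat) (useMin : Bool) : List (List Int × List Int) → Option Int → Option Int
  | [], n => n
  | p :: rest, n =>
    let pts := if idx == 0 then p.1 else p.2
    match (if useMin then PySem.List.min? pts (fun x => x) else PySem.List.max? pts (fun x => x)) with
    | none => none
    | some m =>
      extremumGo idx useMin rest (some (match n with
        | none => m
        | some nv => if useMin then min nv m else max nv m))

def extremum (ls : List (List Int × List Int)) (idx : Nat) (useMin : Bool) : Option Int :=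
  extremumGo idx useMin ls none

def center_strokes (strokes : List (List Int × List Int)) : List (List Int × List Int) :=
  match extremum strokes 0 true, extremum strokes 1 true,
        extremum strokes 0 false, extremum strokes 1 false with
  | some min_x, some min_y, some max_x, some max_y =>
    let dx := PySem.Int.floordiv (256 - (max_x - min_x)) 2 - min_x
    let dy := PySem.Int.floordiv (256 - (max_y - min_y)) 2 - min_y
    strokes.map (fun p => (p.1.map (fun x => x + dx), p.2.map (fun y => y + dy)))
  | _, _, _, _ => []  -- unreachable under Pre_ (the Python raises)

-- ===== PORT B =====
-- allx = sorted(...flattened xs...), ally = sorted(...flattened ys...); bounding box from the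
-- sorted endpoints allx[0], allx[-1], ally[0], ally[-1] (none = IndexError on an empty axis).
def center_strokes_alt (strokes : List (List Int × List Int)) : List (List Int × List Int) :=
  let allx := PySem.List.sorted (strokes.flatMap (fun p => p.1)) (fun x => x) false
  let ally := PySem.List.sorted (strokes.flatMap (fun p => p.2)) (fun x => x) false
  match PySem.List.pyGet? allx (-1) with
  | none => []  -- unreachable under Pre_ (the Python raises IndexError)
  | some mxx =>
    match PySem.List.pyGet? allx 0 with
    | none => []
    | some mnx =>
      match PySem.List.pyGet? ally (-1) with
      | none => []
      | some mxy =>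
        match PySem.List.pyGet? ally 0 with
        | none => []
        | some mny =>
          let dx := PySem.Int.floordiv (256 - (mxx - mnx)) 2 - mnx
          let dy := PySem.Int.floordiv (256 - (mxy - mny)) 2 - mny
          strokes.map (fun p => (p.1.map (fun x => x + dx), p.2.map (fun y => y + dy)))

-- ===== PRECONDITION & SPEC =====
-- Pre_ excludes exactly the inputs where A raises: empty strokes (NameError: n unbound)
-- and any empty coordinate list (ValueError from min()/max() on an empty sequence).
def Pre_center_strokes (strokes : List (List Int × List Int)) : Prop :=
  strokes ≠ [] ∧ ∀ p ∈ strokes, p.1 ≠ [] ∧ p.2 ≠ []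
instance (strokes : List (List Int × List Int)) : Decidable (Pre_center_strokes strokes) := by
  unfold Pre_center_strokes; infer_instance

def pvWitness_center_strokes : (List (List Int × List Int)) := [([1, 5], [2]), ([0], [7, 3])]

def Spec_center_strokes (strokes : List (List Int × List Int)) (out : List (List Int × List Int)) : Prop := out = center_strokes_alt strokes
instance (strokes : List (List Int × List Int)) (out : List (List Int × List Int)) : Decidable (Spec_center_strokes strokes out) := by unfold Spec_center_strokes; infer_instance

-- ===== CLAIM (what is proved, stated in full; the proofs are below) =====
def Claim_equal_center_strokes : Prop := ∀ (strokes : List (List Int × List Int)), Dom_center_strokes strokes → Pre_center_strokes strokes → Spec_center_strokes strokes (center_strokes strokes)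

-- ===== LEMMAS AND PROOFS =====

-- projection used by A's helper and the flattened list it scans
def projOf (idx : Nat) (p : List Int × List Int) : List Int := if idx == 0 then p.1 else p.2

theorem min?_spec {xs : List Int} (h : xs ≠ []) :
    ∃ m, PySem.List.min? xs (fun x => x) = some m ∧ m ∈ xs ∧ ∀ y ∈ xs, m ≤ y := by
  cases hm : PySem.List.min? xs (fun x => x) with
  | none => exact absurd ((PySem.List.min?_eq_none_iff _ _).1 hm) h
  | some m =>
    exact ⟨m, rfl, PySem.List.min?_mem hm, fun y hy => PySem.List.min?_isMin hm y hy⟩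

theorem max?_spec {xs : List Int} (h : xs ≠ []) :
    ∃ m, PySem.List.max? xs (fun x => x) = some m ∧ m ∈ xs ∧ ∀ y ∈ xs, y ≤ m := by
  cases hm : PySem.List.max? xs (fun x => x) with
  | none => exact absurd ((PySem.List.max?_eq_none_iff _ _).1 hm) h
  | some m =>
    exact ⟨m, rfl, PySem.List.max?_mem hm, fun y hy => PySem.List.max?_isMax hm y hy⟩

theorem extremumGo_min_step (idx : Nat) (p : List Int × List Int)
    (rest : List (List Int × List Int)) (n : Option Int) {m : Int}
    (hm : PySem.List.min? (projOf idx p) (fun x => x) = some m) :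
    extremumGo idx true (p :: rest) n =
      extremumGo idx true rest (some (match n with | none => m | some nv => min nv m)) := by
  simp only [extremumGo]
  rw [show (PySem.List.min? (if idx == 0 then p.1 else p.2) fun x => x) = some m from hm]
  simp

theorem extremumGo_max_step (idx : Nat) (p : List Int × List Int)
    (rest : List (List Int × List Int)) (n : Option Int) {m : Int}
    (hm : PySem.List.max? (projOf idx p) (fun x => x) = some m) :
    extremumGo idx false (p :: rest) n =
      extremumGo idx false rest (some (match n with | none => m | some nv => max nv m)) := by
  simp only [extremumGo]
  rw [show (PySem.List.max? (if idx == 0 then p.1 else p.2) fun x => x) = some m from hm]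
  simp

theorem extremumGo_min_spec (idx : Nat) :
    ∀ (l : List (List Int × List Int)) (a : Int),
      (∀ p ∈ l, projOf idx p ≠ []) →
      ∃ r, extremumGo idx true l (some a) = some r ∧
           r ∈ a :: l.flatMap (projOf idx) ∧
           ∀ y ∈ a :: l.flatMap (projOf idx), r ≤ y := by
  intro l
  induction l with
  | nil => intro a _; exact ⟨a, rfl, by simp, by simp⟩
  | cons p rest ih =>
    intro a h
    obtain ⟨m, hm, hmem, hmin⟩ := min?_spec (h p (List.mem_cons_self ..))
    obtain ⟨r, hr, hrmem, hrle⟩ := ih (min a m) (fun q hq => h q (List.mem_cons_of_mem _ hq))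
    refine ⟨r, ?_, ?_, ?_⟩
    · rw [extremumGo_min_step idx p rest (some a) hm]; exact hr
    · rcases List.mem_cons.1 hrmem with h1 | h2
      · rcases min_choice a m with hc | hc
        · rw [h1, hc]; exact List.mem_cons_self ..
        · rw [h1, hc]
          refine List.mem_cons_of_mem _ ?_
          rw [List.flatMap_cons, List.mem_append]
          exact Or.inl hmem
      · refine List.mem_cons_of_mem _ ?_
        rw [List.flatMap_cons, List.mem_append]
        exact Or.inr h2
    · have hra : r ≤ min a m := hrle _ (List.mem_cons_self ..)
      intro y hy
      rcases List.mem_cons.1 hy with h1 | h2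
      · exact h1 ▸ le_trans hra (min_le_left a m)
      · rw [List.flatMap_cons, List.mem_append] at h2
        rcases h2 with hp | hrest
        · exact le_trans (le_trans hra (min_le_right a m)) (hmin y hp)
        · exact hrle y (List.mem_cons_of_mem _ hrest)

theorem extremumGo_max_spec (idx : Nat) :
    ∀ (l : List (List Int × List Int)) (a : Int),
      (∀ p ∈ l, projOf idx p ≠ []) →
      ∃ r, extremumGo idx false l (some a) = some r ∧
           r ∈ a :: l.flatMap (projOf idx) ∧
           ∀ y ∈ a :: l.flatMap (projOf idx), y ≤ r := by
  intro l
  induction l with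
  | nil => intro a _; exact ⟨a, rfl, by simp, by simp⟩
  | cons p rest ih =>
    intro a h
    obtain ⟨m, hm, hmem, hmax⟩ := max?_spec (h p (List.mem_cons_self ..))
    obtain ⟨r, hr, hrmem, hrge⟩ := ih (max a m) (fun q hq => h q (List.mem_cons_of_mem _ hq))
    refine ⟨r, ?_, ?_, ?_⟩
    · rw [extremumGo_max_step idx p rest (some a) hm]; exact hr
    · rcases List.mem_cons.1 hrmem with h1 | h2
      · rcases max_choice a m with hc | hc
        · rw [h1, hc]; exact List.mem_cons_self ..
        · rw [h1, hc]
          refine List.mem_cons_of_mem _ ?_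
          rw [List.flatMap_cons, List.mem_append]
          exact Or.inl hmem
      · refine List.mem_cons_of_mem _ ?_
        rw [List.flatMap_cons, List.mem_append]
        exact Or.inr h2
    · have hra : max a m ≤ r := hrge _ (List.mem_cons_self ..)
      intro y hy
      rcases List.mem_cons.1 hy with h1 | h2
      · exact h1 ▸ le_trans (le_max_left a m) hra
      · rw [List.flatMap_cons, List.mem_append] at h2
        rcases h2 with hp | hrest
        · exact le_trans (le_trans (hmax y hp) (le_max_right a m)) hra
        · exact hrge y (List.mem_cons_of_mem _ hrest)

theorem extremum_min_spec (idx : Nat) (strokes : List (List Int × List Int))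
    (hne : strokes ≠ []) (hall : ∀ p ∈ strokes, projOf idx p ≠ []) :
    ∃ r, extremum strokes idx true = some r ∧
         r ∈ strokes.flatMap (projOf idx) ∧
         ∀ y ∈ strokes.flatMap (projOf idx), r ≤ y := by
  cases strokes with
  | nil => exact absurd rfl hne
  | cons p rest =>
    obtain ⟨m, hm, hmem, hmin⟩ := min?_spec (hall p (List.mem_cons_self ..))
    obtain ⟨r, hr, hrmem, hrle⟩ :=
      extremumGo_min_spec idx rest m (fun q hq => hall q (List.mem_cons_of_mem _ hq))
    refine ⟨r, ?_, ?_, ?_⟩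
    · unfold extremum
      rw [extremumGo_min_step idx p rest none hm]; exact hr
    · rw [List.flatMap_cons, List.mem_append]
      rcases List.mem_cons.1 hrmem with h1 | h2
      · exact Or.inl (h1 ▸ hmem)
      · exact Or.inr h2
    · have hra : r ≤ m := hrle _ (List.mem_cons_self ..)
      intro y hy
      rw [List.flatMap_cons, List.mem_append] at hy
      rcases hy with hp | hrest
      · exact le_trans hra (hmin y hp)
      · exact hrle y (List.mem_cons_of_mem _ hrest)

theorem extremum_max_spec (idx : Nat) (strokes : List (List Int × List Int))
    (hne : strokes ≠ []) (hall : ∀ p ∈ strokes, projOf idx p ≠ []) :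
    ∃ r, extremum strokes idx false = some r ∧
         r ∈ strokes.flatMap (projOf idx) ∧
         ∀ y ∈ strokes.flatMap (projOf idx), y ≤ r := by
  cases strokes with
  | nil => exact absurd rfl hne
  | cons p rest =>
    obtain ⟨m, hm, hmem, hmax⟩ := max?_spec (hall p (List.mem_cons_self ..))
    obtain ⟨r, hr, hrmem, hrge⟩ :=
      extremumGo_max_spec idx rest m (fun q hq => hall q (List.mem_cons_of_mem _ hq))
    refine ⟨r, ?_, ?_, ?_⟩
    · unfold extremum
      rw [extremumGo_max_step idx p rest none hm]; exact hr
    · rw [List.flatMap_cons, List.mem_append]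
      rcases List.mem_cons.1 hrmem with h1 | h2
      · exact Or.inl (h1 ▸ hmem)
      · exact Or.inr h2
    · have hra : m ≤ r := hrge _ (List.mem_cons_self ..)
      intro y hy
      rw [List.flatMap_cons, List.mem_append] at hy
      rcases hy with hp | hrest
      · exact le_trans (hmax y hp) hra
      · exact hrge y (List.mem_cons_of_mem _ hrest)

-- the last element of a ≤-sorted list bounds every element
theorem getLast?_of_pairwise_le :
    ∀ (s : List Int), s.Pairwise (· ≤ ·) → ∀ m, s.getLast? = some m → ∀ y ∈ s, y ≤ m := by
  intro s
  induction s with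
  | nil => intro _ m h; simp at h
  | cons x t ih =>
    intro hp m hlast y hy
    rcases List.pairwise_cons.1 hp with ⟨hx, ht⟩
    cases t with
    | nil =>
      simp at hlast hy
      omega
    | cons z u =>
      rw [List.getLast?_cons_cons] at hlast
      have hmem : m ∈ z :: u := List.mem_of_getLast? hlast
      rcases List.mem_cons.1 hy with h1 | h2
      · exact h1 ▸ hx m hmem
      · exact ih ht m hlast y h2

-- B's endpoints of the sorted flattened list are the min / max of that list
theorem sorted_head_spec (l : List Int) (hne : l ≠ []) :
    ∃ m, PySem.List.pyGet? (PySem.List.sorted l (fun x => x) false) 0 = some m ∧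
         m ∈ l ∧ ∀ y ∈ l, m ≤ y := by
  cases hs : PySem.List.sorted l (fun x => x) false with
  | nil => exact absurd ((PySem.List.sorted_eq_nil_iff _ _ _).1 hs) hne
  | cons m t =>
    refine ⟨m, PySem.List.pyGet?_zero_cons m t, ?_, ?_⟩
    · exact (PySem.List.mem_sorted _ _ _ _).1 (hs ▸ List.mem_cons_self ..)
    · exact fun y hy => PySem.List.key_head_sorted_le l (fun x => x) hs y hy

theorem sorted_last_spec (l : List Int) (hne : l ≠ []) :
    ∃ m, PySem.List.pyGet? (PySem.List.sorted l (fun x => x) false) (-1) = some m ∧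
         m ∈ l ∧ ∀ y ∈ l, y ≤ m := by
  have hsne : PySem.List.sorted l (fun x => x) false ≠ [] := by
    intro h; exact hne ((PySem.List.sorted_eq_nil_iff _ _ _).1 h)
  obtain ⟨m, hm⟩ := Option.ne_none_iff_exists'.1 (mt List.getLast?_eq_none_iff.1 hsne)
  have hpw : (PySem.List.sorted l (fun x => x) false).Pairwise (· ≤ ·) :=
    PySem.List.sorted_pairwise l (fun x => x)
  refine ⟨m, by rw [PySem.List.pyGet?_neg_one]; exact hm, ?_, ?_⟩
  · exact (PySem.List.mem_sorted _ _ _ _).1 (List.mem_of_getLast? hm)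
  · intro y hy
    exact getLast?_of_pairwise_le _ hpw m hm y ((PySem.List.mem_sorted _ _ _ _).2 hy)

-- ===== VERDICT (by name: the statement is the Claim_ definition above) =====
theorem center_strokes_spec : Claim_equal_center_strokes := by
  intro strokes _ hpre
  obtain ⟨hne, hall⟩ := hpre
  unfold Spec_center_strokes
  have hallx : ∀ p ∈ strokes, projOf 0 p ≠ [] := fun p hp => (hall p hp).1
  have hally : ∀ p ∈ strokes, projOf 1 p ≠ [] := fun p hp => (hall p hp).2
  have hproj0 : strokes.flatMap (projOf 0) = strokes.flatMap (fun p => p.1) := rfl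
  have hproj1 : strokes.flatMap (projOf 1) = strokes.flatMap (fun p => p.2) := rfl
  have hflatx : strokes.flatMap (projOf 0) ≠ [] := by
    cases strokes with
    | nil => exact absurd rfl hne
    | cons p rest =>
      rw [List.flatMap_cons]
      intro h
      exact hallx p (List.mem_cons_self ..) (List.append_eq_nil_iff.1 h).1
  have hflaty : strokes.flatMap (projOf 1) ≠ [] := by
    cases strokes with
    | nil => exact absurd rfl hne
    | cons p rest =>
      rw [List.flatMap_cons]
      intro h
      exact hally p (List.mem_cons_self ..) (List.append_eq_nil_iff.1 h).1
  obtain ⟨rminx, hA1, hA1m, hA1le⟩ := extremum_min_spec 0 strokes hne hallx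
  obtain ⟨rminy, hA2, hA2m, hA2le⟩ := extremum_min_spec 1 strokes hne hally
  obtain ⟨rmaxx, hA3, hA3m, hA3ge⟩ := extremum_max_spec 0 strokes hne hallx
  obtain ⟨rmaxy, hA4, hA4m, hA4ge⟩ := extremum_max_spec 1 strokes hne hally
  obtain ⟨bminx, hB1, hB1m, hB1le⟩ := sorted_head_spec (strokes.flatMap (fun p => p.1)) (hproj0 ▸ hflatx)
  obtain ⟨bmaxx, hB2, hB2m, hB2ge⟩ := sorted_last_spec (strokes.flatMap (fun p => p.1)) (hproj0 ▸ hflatx)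
  obtain ⟨bminy, hB3, hB3m, hB3le⟩ := sorted_head_spec (strokes.flatMap (fun p => p.2)) (hproj1 ▸ hflaty)
  obtain ⟨bmaxy, hB4, hB4m, hB4ge⟩ := sorted_last_spec (strokes.flatMap (fun p => p.2)) (hproj1 ▸ hflaty)
  have eminx : rminx = bminx :=
    le_antisymm (hA1le bminx (hproj0 ▸ hB1m)) (hB1le rminx (hproj0 ▸ hA1m))
  have emaxx : rmaxx = bmaxx :=
    le_antisymm (hB2ge rmaxx (hproj0 ▸ hA3m)) (hA3ge bmaxx (hproj0 ▸ hB2m))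
  have eminy : rminy = bminy :=
    le_antisymm (hA2le bminy (hproj1 ▸ hB3m)) (hB3le rminy (hproj1 ▸ hA2m))
  have emaxy : rmaxy = bmaxy :=
    le_antisymm (hB4ge rmaxy (hproj1 ▸ hA4m)) (hA4ge bmaxy (hproj1 ▸ hB4m))
  subst eminx emaxx eminy emaxy
  unfold center_strokes center_strokes_alt
  rw [hA1, hA2, hA3, hA4]
  simp only [hB1, hB2, hB3, hB4]
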